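-- pv_equiv track=rewrite | github.com/foreverfl/-Algorithm-ProblemSolving | src/programmers/Programmers_12987_NumberGame.py | solution
-- ===== SOURCE A (Python) =====
-- def solution(A, B):
--     A.sort()
--     B.sort()
--
--     answer = 0
--     b_index = 0
--
--     for num in A:
--         while b_index < len(B) and B[b_index] <= num:
--             b_index += 1
--
--         if b_index == len(B):
--             break
--
--         answer += 1
--         b_index += 1
--
--     return answer
-- ===== SOURCE B (Python) =====
-- def solution(A, B):
--     A.sort()
--     B.sort()
--
--     # one merged sweep: B-events (tag 0) precede A-events (tag 1) on equal value,
--     # so a B element can only consume a strictly smaller A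
--     events = sorted([(b, 0) for b in B] + [(a, 1) for a in A])
--
--     avail = 0
--     matched = 0
--     for _, tag in events:
--         if tag == 1:
--             avail += 1
--         elif avail:
--             avail -= 1
--             matched += 1
--
--     return matched
-- ===== Notes on version B (the rewrite author's own statement) =====
-- stated objective: alternative
-- what changed: Instead of A's two-pointer greedy (iterate A with an inner skip-while over B and a break), B builds one merged event list of (value, tag) pairs sorted lexicographically (B-events before A-events on ties) and does a single counting sweep: A-events increment a pool of available smaller elements, each B-event consumes one if available; the consumed count is the answer.
import Mathlib
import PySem

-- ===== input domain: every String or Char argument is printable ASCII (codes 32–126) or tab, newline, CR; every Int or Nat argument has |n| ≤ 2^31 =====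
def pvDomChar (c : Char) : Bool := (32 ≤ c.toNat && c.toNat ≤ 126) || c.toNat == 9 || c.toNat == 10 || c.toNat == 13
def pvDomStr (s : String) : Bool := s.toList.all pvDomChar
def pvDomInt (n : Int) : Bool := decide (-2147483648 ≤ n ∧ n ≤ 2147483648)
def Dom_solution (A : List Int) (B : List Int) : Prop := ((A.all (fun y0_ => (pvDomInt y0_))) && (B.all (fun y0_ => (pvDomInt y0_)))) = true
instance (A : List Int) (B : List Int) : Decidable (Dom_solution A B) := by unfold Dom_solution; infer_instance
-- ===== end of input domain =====

-- B replaces A's two-pointer greedy (for-over-A with an inner skip-while and break) by a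
-- different algorithm: one merged event list sorted by (value, tag) and a single counting
-- sweep (objective: alternative). Both Pythons sort their arguments in place; the
-- equivalence proved here is about the return value.

-- ===== PORT A =====
-- the inner `while b_index < len(B) and B[b_index] <= num: b_index += 1`
def pySkip (Bs : List Int) (num : Int) (j : Nat) : Nat :=
  if h : j < Bs.length then
    if Bs.getD j 0 ≤ num then pySkip Bs num (j + 1) else j
  else j
termination_by Bs.length - j

-- the `for num in A` loop, state = (answer, b_index)
def loopA (Bs : List Int) : List Int → Int → Nat → Int
  | [], ans, _ => ans
  | num :: rest, ans, j =>
    let j' := pySkip Bs num j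
    if j' = Bs.length then ans
    else loopA Bs rest (ans + 1) (j' + 1)

def solution (A : List Int) (B : List Int) : Int :=
  let As := PySem.List.sorted A (fun x => x) false
  let Bs := PySem.List.sorted B (fun x => x) false
  loopA Bs As 0 0

-- ===== PORT B =====
-- the `for _, tag in events` loop, state = (avail, matched)
def loopS : List (Int × Int) → Nat → Nat → Nat
  | [], _, matched => matched
  | (_, tag) :: es, avail, matched =>
    if tag = 1 then loopS es (avail + 1) matched
    else if avail ≠ 0 then loopS es (avail - 1) (matched + 1)
    else loopS es avail matched

def solution_alt (A : List Int) (B : List Int) : Int :=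
  let As := PySem.List.sorted A (fun x => x) false
  let Bs := PySem.List.sorted B (fun x => x) false
  -- events = sorted([(b, 0) for b in B] + [(a, 1) for a in A]); tuple sort = sorted2
  let events := PySem.List.sorted2
    (Bs.map (fun b => (b, (0 : Int))) ++ As.map (fun a => (a, (1 : Int)))) Prod.fst Prod.snd false
  (loopS events 0 0 : Int)

-- ===== PRECONDITION & SPEC =====
def Spec_solution (A : List Int) (B : List Int) (out : Int) : Prop := out = solution_alt A B
instance (A : List Int) (B : List Int) (out : Int) : Decidable (Spec_solution A B out) := by unfold Spec_solution; infer_instance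

-- ===== CLAIM (what is proved, stated in full; the proofs are below) =====
def Claim_equal_solution : Prop := ∀ (A : List Int) (B : List Int), Dom_solution A B → Spec_solution A B (solution A B)

-- ===== LEMMAS AND PROOFS =====

-- functional skeleton of A's loop: consume A, drop the ≤-prefix of B each step
def gA : List Int → List Int → Int
  | [], _ => 0
  | x :: A', l =>
    match l.dropWhile (fun b => decide (b ≤ x)) with
    | [] => 0
    | _ :: l' => 1 + gA A' l'

-- intermediate skeleton: consume B, advance through A on a win
def gB : List Int → List Int → Nat
  | _, [] => 0
  | As, b :: rest =>
    match As with
    | [] => gB [] rest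
    | x :: A' => if x < b then 1 + gB A' rest else gB (x :: A') rest

-- gB with `free` extra A-slots already known to lie strictly below every remaining b
def gB' : Nat → List Int → List Int → Nat
  | _, _, [] => 0
  | free, As, b :: Bs =>
    if free ≠ 0 then 1 + gB' (free - 1) As Bs
    else
      match As with
      | [] => gB' 0 [] Bs
      | a :: As' => if a < b then 1 + gB' 0 As' Bs else gB' 0 (a :: As') Bs

-- the lexicographic order Python uses on the (value, tag) event tuples
def ble (p q : Int × Int) : Prop := p.1 < q.1 ∨ (p.1 = q.1 ∧ p.2 ≤ q.2)
def ltB (p q : Int × Int) : Bool :=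
  decide (p.1 < q.1) || (!decide (q.1 < p.1) && decide (p.2 < q.2))

-- explicit merge of the two sorted event streams (B-events first on ties)
def mergeE : List Int → List Int → List (Int × Int)
  | [], as_ => as_.map (fun a => (a, 1))
  | b :: bs, [] => (b :: bs).map (fun b => (b, 0))
  | b :: bs, a :: as_ =>
    if b ≤ a then (b, 0) :: mergeE bs (a :: as_)
    else (a, 1) :: mergeE (b :: bs) as_

theorem mergeE_nil_left (as_ : List Int) : mergeE [] as_ = as_.map (fun a => (a, 1)) := by
  rw [mergeE]

theorem mergeE_nil_right (bs : List Int) : mergeE bs [] = bs.map (fun b => (b, 0)) := by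
  cases bs with
  | nil => rw [mergeE]; rfl
  | cons b t => rw [mergeE]

theorem mergeE_cons (b a : Int) (bs as_ : List Int) : mergeE (b :: bs) (a :: as_) =
    if b ≤ a then (b, 0) :: mergeE bs (a :: as_) else (a, 1) :: mergeE (b :: bs) as_ := by
  rw [mergeE]

theorem mergeE_perm (bs : List Int) : ∀ (as_ : List Int),
    (mergeE bs as_).Perm (bs.map (fun b => (b, (0 : Int))) ++ as_.map (fun a => (a, (1 : Int)))) := by
  induction bs with
  | nil => intro as_; rw [mergeE_nil_left]; simp
  | cons b t ih =>
    intro as_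
    induction as_ with
    | nil => rw [mergeE_nil_right]; simp
    | cons a as' ihA =>
      rw [mergeE_cons]
      by_cases hba : b ≤ a
      · rw [if_pos hba]
        exact ((ih (a :: as')).cons (b, 0))
      · rw [if_neg hba]
        refine (ihA.cons (a, 1)).trans ?_
        exact (List.perm_middle).symm

theorem pySkip_drop (Bs : List Int) (num : Int) (j : Nat) (hj : j ≤ Bs.length) :
    Bs.drop (pySkip Bs num j) = (Bs.drop j).dropWhile (fun b => decide (b ≤ num)) ∧
    pySkip Bs num j ≤ Bs.length := by
  unfold pySkip
  split
  · rename_i h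
    have hget : Bs.getD j 0 = Bs[j] := by
      rw [List.getD_eq_getElem?_getD, List.getElem?_eq_getElem h]; rfl
    split
    · rename_i hle
      rw [hget] at hle
      have := pySkip_drop Bs num (j + 1) (by omega)
      refine ⟨?_, this.2⟩
      rw [this.1, List.drop_eq_getElem_cons h, List.dropWhile_cons]
      simp [hle]
    · rename_i hgt
      rw [hget] at hgt
      refine ⟨?_, by omega⟩
      rw [List.drop_eq_getElem_cons h, List.dropWhile_cons]
      simp
      omega
  · rename_i h
    have hlen : Bs.length ≤ j := by omega
    refine ⟨by simp [List.drop_eq_nil_of_le hlen], by omega⟩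
termination_by Bs.length - j

theorem loopA_eq (Bs : List Int) (As : List Int) :
    ∀ (ans : Int) (j : Nat), j ≤ Bs.length →
      loopA Bs As ans j = ans + gA As (Bs.drop j) := by
  induction As with
  | nil => intro ans j _; simp [loopA, gA]
  | cons x A' ih =>
    intro ans j hj
    obtain ⟨hdrop, hle⟩ := pySkip_drop Bs x j hj
    show (if pySkip Bs x j = Bs.length then ans
          else loopA Bs A' (ans + 1) (pySkip Bs x j + 1)) = ans + gA (x :: A') (Bs.drop j)
    by_cases hend : pySkip Bs x j = Bs.length
    · have hnil : (Bs.drop j).dropWhile (fun b => decide (b ≤ x)) = [] := by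
        rw [← hdrop, hend]; simp
      simp [hend, gA, hnil]
    · have hlt : pySkip Bs x j < Bs.length := lt_of_le_of_ne hle hend
      have hne : Bs.drop (pySkip Bs x j) ≠ [] := by
        simp [List.drop_eq_nil_iff]; omega
      obtain ⟨y, l', hyl⟩ := List.exists_cons_of_ne_nil hne
      have htail : Bs.drop (pySkip Bs x j + 1) = l' := by
        rw [← List.tail_drop, hyl]; rfl
      rw [if_neg hend, ih (ans + 1) (pySkip Bs x j + 1) (by omega), htail]
      have hg : gA (x :: A') (Bs.drop j) = 1 + gA A' l' := by
        show (match (Bs.drop j).dropWhile (fun b => decide (b ≤ x)) with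
              | [] => (0 : Int) | _ :: l' => 1 + gA A' l') = 1 + gA A' l'
        rw [← hdrop, hyl]
      rw [hg]; ring

theorem gA_eq_gB : ∀ (Bs As : List Int), gA As Bs = (gB As Bs : Int) := by
  intro Bs
  induction Bs with
  | nil => intro As; cases As <;> simp [gA, gB]
  | cons b rest ih =>
    intro As
    cases As with
    | nil => simpa [gA, gB] using (by simpa [gA] using (ih []).symm : (gB [] rest : Int) = 0).symm
    | cons x A' =>
      by_cases hwin : x < b
      · have hstop : (b :: rest).dropWhile (fun c => decide (c ≤ x)) = b :: rest := by
          rw [List.dropWhile_cons]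
          simp [show ¬ b ≤ x by omega]
        show (match (b :: rest).dropWhile (fun c => decide (c ≤ x)) with
              | [] => (0 : Int) | _ :: l' => 1 + gA A' l') = (gB (x :: A') (b :: rest) : Int)
        rw [hstop]
        simp [gB, hwin, ih A']
      · have hskip : (b :: rest).dropWhile (fun c => decide (c ≤ x)) =
            rest.dropWhile (fun c => decide (c ≤ x)) := by
          rw [List.dropWhile_cons]
          simp [show b ≤ x by omega]
        have hA : gA (x :: A') (b :: rest) = gA (x :: A') rest := by
          show (match (b :: rest).dropWhile (fun c => decide (c ≤ x)) with
                | [] => (0 : Int) | _ :: l' => 1 + gA A' l') = gA (x :: A') rest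
          rw [hskip]; rfl
        rw [hA, ih (x :: A')]
        simp [gB, hwin]

theorem gB'_zero : ∀ (Bs As : List Int), gB' 0 As Bs = gB As Bs := by
  intro Bs
  induction Bs with
  | nil => intro As; cases As <;> simp [gB, gB']
  | cons b rest ih =>
    intro As
    cases As with
    | nil => simp [gB, gB', ih]
    | cons a A' => by_cases h : a < b <;> simp [gB, gB', h, ih]

theorem gB'_promote : ∀ (Bs : List Int) (a : Int) (k : Nat) (As : List Int),
    (∀ x ∈ Bs, a < x) → gB' (k + 1) As Bs = gB' k (a :: As) Bs := by
  intro Bs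
  induction Bs with
  | nil => intro a k As _; simp [gB']
  | cons b rest ih =>
    intro a k As hlt
    have hab : a < b := hlt b (by simp)
    cases k with
    | zero =>
      simp [gB', hab]
    | succ k' =>
      have h1 : gB' (k' + 1 + 1) As (b :: rest) = 1 + gB' (k' + 1) As rest := by
        simp [gB']
      have h2 : gB' (k' + 1) (a :: As) (b :: rest) = 1 + gB' k' (a :: As) rest := by
        simp [gB']
      rw [h1, h2, ih a k' As (fun x hx => hlt x (by simp [hx]))]

theorem loopS_mapA (as_ : List Int) : ∀ (free m : Nat),
    loopS (as_.map (fun a => (a, 1))) free m = m := by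
  induction as_ with
  | nil => intro free m; simp [loopS]
  | cons a t ih => intro free m; simp [loopS, ih]

theorem loopS_mergeE (Bs : List Int) (hp : Bs.Pairwise (· ≤ ·)) :
    ∀ (As : List Int) (free m : Nat),
      loopS (mergeE Bs As) free m = m + gB' free As Bs := by
  induction Bs with
  | nil =>
    intro As free m
    rw [mergeE_nil_left]
    simp [gB', loopS_mapA]
  | cons b bs ih =>
    have hbs : bs.Pairwise (fun x1 x2 => x1 <= x2) := hp.of_cons
    have hble : forall x, x ∈ bs -> b <= x := fun x hx => List.rel_of_pairwise_cons hp hx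
    intro As
    induction As with
    | nil =>
      intro free m
      rw [mergeE_nil_right]
      have hrec : forall (free m : Nat), loopS (bs.map (fun x => (x, 0))) free m = m + gB' free [] bs := by
        intro free m
        have := ih hbs [] free m
        rwa [mergeE_nil_right] at this
      show loopS ((b, 0) :: bs.map (fun x => (x, 0))) free m = m + gB' free [] (b :: bs)
      by_cases hf : free ≠ 0
      · simp [loopS, hf, gB', hrec]; omega
      · simp at hf
        simp [loopS, hf, gB', hrec]
    | cons a as_ ihA =>
      intro free m
      rw [mergeE_cons]
      by_cases hba : b <= a
      · rw [if_pos hba]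
        show loopS ((b, 0) :: mergeE bs (a :: as_)) free m = m + gB' free (a :: as_) (b :: bs)
        by_cases hf : free ≠ 0
        · simp [loopS, hf, gB', ih hbs]; omega
        · simp at hf
          subst hf
          have hna : ¬ a < b := by omega
          simp [loopS, gB', hna, ih hbs]
      · rw [if_neg hba]
        have hab : a < b := by omega
        show loopS ((a, 1) :: mergeE (b :: bs) as_) free m = m + gB' free (a :: as_) (b :: bs)
        have hrec := ihA (free + 1) m
        simp [loopS] at hrec ⊢
        rw [hrec, gB'_promote (b :: bs) a free as_]
        intro x hx
        rcases List.mem_cons.mp hx with h | h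
        · omega
        · exact lt_of_lt_of_le hab (hble x h)

-- order facts about ble / ltB
theorem ltB_ble {p q : Int × Int} (h : ltB p q = true) : ble p q := by
  simp [ltB] at h; unfold ble; omega

theorem not_ltB_ble {p q : Int × Int} (h : ltB p q = false) : ble q p := by
  simp [ltB] at h; unfold ble; omega

theorem ble_trans {p q r : Int × Int} (h1 : ble p q) (h2 : ble q r) : ble p r := by
  unfold ble at *; omega

theorem ble_antisymm {p q : Int × Int} (h1 : ble p q) (h2 : ble q p) : p = q := by
  unfold ble at *
  have : p.1 = q.1 ∧ p.2 = q.2 := by omega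
  exact Prod.ext this.1 this.2

theorem insertBy_pairwise (x : Int × Int) :
    ∀ (l : List (Int × Int)), l.Pairwise ble → (PySem.List.insertBy ltB x l).Pairwise ble := by
  intro l
  induction l with
  | nil => intro _; simp [PySem.List.insertBy]
  | cons y ys ih =>
    intro hp
    show (if ltB x y = true then x :: y :: ys else y :: PySem.List.insertBy ltB x ys).Pairwise ble
    by_cases h : ltB x y = true
    · rw [if_pos h]
      have hxy : ble x y := ltB_ble h
      refine List.Pairwise.cons ?_ hp
      intro z hz
      rcases List.mem_cons.mp hz with rfl | hz'
      · exact hxy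
      · exact ble_trans hxy (List.rel_of_pairwise_cons hp hz')
    · rw [if_neg h]
      refine List.Pairwise.cons ?_ (ih hp.of_cons)
      intro z hz
      rcases (PySem.List.mem_insertBy ltB x z ys).mp hz with rfl | hz'
      · exact not_ltB_ble (by simpa using h)
      · exact List.rel_of_pairwise_cons hp hz'

theorem foldl_insertBy_pairwise (xs : List (Int × Int)) :
    ∀ (acc : List (Int × Int)), acc.Pairwise ble →
      (xs.foldl (fun acc x => PySem.List.insertBy ltB x acc) acc).Pairwise ble := by
  induction xs with
  | nil => intro acc h; simpa [List.foldl]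
  | cons x t ih => intro acc h; exact ih _ (insertBy_pairwise x acc h)

theorem sorted2_eq_foldl (xs : List (Int × Int)) :
    PySem.List.sorted2 xs Prod.fst Prod.snd false =
      xs.foldl (fun acc x => PySem.List.insertBy ltB x acc) [] := rfl

theorem mergeE_pairwise (bs : List Int) (hb : bs.Pairwise (· ≤ ·)) :
    ∀ (as_ : List Int), as_.Pairwise (· ≤ ·) → (mergeE bs as_).Pairwise ble := by
  induction bs with
  | nil =>
    intro as_ ha
    rw [mergeE_nil_left]
    refine (List.pairwise_map).mpr (ha.imp ?_)
    intro p q h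
    unfold ble; omega
  | cons b t ih =>
    have ht : t.Pairwise (fun x1 x2 => x1 <= x2) := hb.of_cons
    have hble : forall x, x ∈ t -> b <= x := fun x hx => List.rel_of_pairwise_cons hb hx
    intro as_
    induction as_ with
    | nil =>
      intro _
      rw [mergeE_nil_right]
      refine (List.pairwise_map).mpr (hb.imp ?_)
      intro p q h
      unfold ble; omega
    | cons a as' ihA =>
      intro ha
      have ha' : as'.Pairwise (fun x1 x2 => x1 <= x2) := ha.of_cons
      have hale : forall x, x ∈ as' -> a <= x := fun x hx => List.rel_of_pairwise_cons ha hx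
      rw [mergeE_cons]
      by_cases hba : b <= a
      · rw [if_pos hba]
        refine List.Pairwise.cons ?_ (ih ht (a :: as') ha)
        intro q hq
        have := (mergeE_perm t (a :: as')).mem_iff.mp hq
        rcases List.mem_append.mp this with h | h
        · obtain ⟨x, hx, rfl⟩ := List.mem_map.mp h
          have : b <= x := hble x hx
          unfold ble; simp; omega
        · obtain ⟨x, hx, rfl⟩ := List.mem_map.mp h
          have : a <= x := by
            rcases List.mem_cons.mp hx with rfl | h'
            · exact le_refl _
            · exact hale x h'
          unfold ble; simp; omega
      · rw [if_neg hba]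
        have hab : a < b := by omega
        refine List.Pairwise.cons ?_ (ihA ha')
        intro q hq
        have := (mergeE_perm (b :: t) as').mem_iff.mp hq
        rcases List.mem_append.mp this with h | h
        · obtain ⟨x, hx, rfl⟩ := List.mem_map.mp h
          have : b <= x := by
            rcases List.mem_cons.mp hx with rfl | h'
            · exact le_refl _
            · exact hble x h'
          unfold ble; simp; omega
        · obtain ⟨x, hx, rfl⟩ := List.mem_map.mp h
          have : a <= x := hale x hx
          unfold ble; simp; omega

-- ===== VERDICT (by name: the statement is the Claim_ definition above) =====
theorem solution_spec : Claim_equal_solution := by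
  intro A B _
  unfold Spec_solution solution solution_alt
  set As := PySem.List.sorted A (fun x => x) false with hAs
  set Bs := PySem.List.sorted B (fun x => x) false with hBs
  have hpa : As.Pairwise (· ≤ ·) := PySem.List.sorted_pairwise A (fun x => x)
  have hpb : Bs.Pairwise (· ≤ ·) := PySem.List.sorted_pairwise B (fun x => x)
  have hev : PySem.List.sorted2
      (Bs.map (fun b => (b, (0 : Int))) ++ As.map (fun a => (a, (1 : Int)))) Prod.fst Prod.snd false
      = mergeE Bs As := by
    have hperm : (PySem.List.sorted2
        (Bs.map (fun b => (b, (0 : Int))) ++ As.map (fun a => (a, (1 : Int)))) Prod.fst Prod.snd false).Perm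
        (mergeE Bs As) :=
      (PySem.List.sorted2_perm _ _ _ _).trans (mergeE_perm Bs As).symm
    have hs1 : (PySem.List.sorted2
        (Bs.map (fun b => (b, (0 : Int))) ++ As.map (fun a => (a, (1 : Int)))) Prod.fst Prod.snd false).Pairwise ble := by
      rw [sorted2_eq_foldl]
      exact foldl_insertBy_pairwise _ [] (by simp)
    have hs2 : (mergeE Bs As).Pairwise ble := mergeE_pairwise Bs hpb As hpa
    exact List.Perm.eq_of_pairwise (fun a b _ _ h1 h2 => ble_antisymm h1 h2) hs1 hs2 hperm
  rw [loopA_eq Bs As 0 0 (Nat.zero_le _)]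
  simp only [hev]
  rw [loopS_mergeE Bs hpb As 0 0, gB'_zero, List.drop_zero]
  simp [gA_eq_gB]
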